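-- pv_equiv track=rewrite | github.com/Reta110/crewai | mcp_database/schema_intelligence.py | _detect_table_groups
-- ===== SOURCE A (Python) =====
-- from collections import Counter, defaultdict
--
-- def _detect_table_groups(tables: list[str]) -> dict[str, list[str]]:
--     """Agrupa tablas por su prefijo."""
--     groups = defaultdict(list)
--     for t in tables:
--         parts = t.split("_")
--         if len(parts) > 1:
--             groups[parts[0] + "_"].append(t)
--         else:
--             groups["_sin_prefijo"].append(t)
--     return dict(groups)
-- ===== SOURCE B (Python) =====
-- def _detect_table_groups(tables: list[str]) -> dict[str, list[str]]:
--     """Agrupa tablas por su prefijo (dedup keys + per-key filter)."""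
--     def key(t):
--         parts = t.split("_")
--         return parts[0] + "_" if len(parts) > 1 else "_sin_prefijo"
--     ks = [key(t) for t in tables]
--     return {k: [t for t, kt in zip(tables, ks) if kt == k] for k in dict.fromkeys(ks)}
-- ===== Notes on version B (the rewrite author's own statement) =====
-- stated objective: alternative
-- what changed: Replaces the single-pass defaultdict-append loop with computing each table's key once, ordered-deduplicating the key list (dict.fromkeys), and building each group by a per-key filter over the zipped (table, key) list.
import Mathlib
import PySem

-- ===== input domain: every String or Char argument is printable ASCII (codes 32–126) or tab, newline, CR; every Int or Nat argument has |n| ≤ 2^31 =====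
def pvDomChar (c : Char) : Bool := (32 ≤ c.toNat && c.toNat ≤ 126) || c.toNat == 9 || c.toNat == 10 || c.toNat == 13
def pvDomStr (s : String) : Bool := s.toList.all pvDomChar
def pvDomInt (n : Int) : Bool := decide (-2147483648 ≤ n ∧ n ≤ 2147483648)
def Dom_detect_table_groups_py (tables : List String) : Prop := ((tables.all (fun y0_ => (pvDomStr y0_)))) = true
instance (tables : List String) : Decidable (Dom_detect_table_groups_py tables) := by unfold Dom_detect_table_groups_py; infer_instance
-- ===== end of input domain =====

-- B replaces A's single-pass defaultdict-append loop by an ordered dedup of the key list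
-- followed by one filter pass per distinct key (objective: alternative decomposition, not faster).

-- ===== PORT A =====
-- A: groups = defaultdict(list); for t: parts = t.split("_"); append t under parts[0]+"_" or "_sin_prefijo"; return dict(groups).
-- t.split("_") has a nonempty separator, so Str.split? is always `some`; the `.getD []` default is never used.
def detect_table_groups_py (tables : List String) : List (String × List String) :=
  (tables.foldl
    (fun (d : PySem.Dict String (List String)) t =>
      let parts := (PySem.Str.split? t "_").getD []
      if parts.length > 1 then
        d.modify (PySem.List.pyGetD parts 0 "" ++ "_") [] (fun l => l ++ [t])
      else
        d.modify "_sin_prefijo" [] (fun l => l ++ [t]))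
    PySem.Dict.empty).items

-- ===== PORT B =====
-- key(t) of Source B
def pvKeyB (t : String) : String :=
  let parts := (PySem.Str.split? t "_").getD []
  if parts.length > 1 then PySem.List.pyGetD parts 0 "" ++ "_" else "_sin_prefijo"

def detect_table_groups_py_alt (tables : List String) : List (String × List String) :=
  let ks := tables.map pvKeyB
  (PySem.List.dedup ks).map
    (fun k => (k, ((tables.zip ks).filter (fun p => p.2 == k)).map (fun p => p.1)))

-- ===== PRECONDITION & SPEC =====
def Spec_detect_table_groups_py (tables : List String) (out : List (String × List String)) : Prop := out = detect_table_groups_py_alt tables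
instance (tables : List String) (out : List (String × List String)) : Decidable (Spec_detect_table_groups_py tables out) := by unfold Spec_detect_table_groups_py; infer_instance

-- ===== CLAIM (what is proved, stated in full; the proofs are below) =====
def Claim_equal_detect_table_groups_py : Prop := ∀ (tables : List String), Dom_detect_table_groups_py tables → Spec_detect_table_groups_py tables (detect_table_groups_py tables)

-- ===== LEMMAS AND PROOFS =====

-- A's loop body is "modify at key pvKeyB t, append t", uniformly over both branches.
theorem detect_step_eq (d : PySem.Dict String (List String)) (t : String) :
    (let parts := (PySem.Str.split? t "_").getD []
     if parts.length > 1 then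
       d.modify (PySem.List.pyGetD parts 0 "" ++ "_") [] (fun l => l ++ [t])
     else
       d.modify "_sin_prefijo" [] (fun l => l ++ [t]))
    = d.modify (pvKeyB t) [] (fun l => l ++ [t]) := by
  simp only [pvKeyB]
  split_ifs <;> rfl

-- the dictionary A builds, as a fold over (key, value) pairs
theorem detect_fold_eq (tables : List String) :
    tables.foldl
      (fun (d : PySem.Dict String (List String)) t =>
        let parts := (PySem.Str.split? t "_").getD []
        if parts.length > 1 then
          d.modify (PySem.List.pyGetD parts 0 "" ++ "_") [] (fun l => l ++ [t])
        else
          d.modify "_sin_prefijo" [] (fun l => l ++ [t]))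
      PySem.Dict.empty
    = tables.foldl (fun d t => d.modify (pvKeyB t) [] (fun l => l ++ [t])) PySem.Dict.empty := by
  exact PySem.List.foldl_congr_mem _ _ _ _ (fun d t _ => detect_step_eq d t)

-- ===== VERDICT (by name: the statement is the Claim_ definition above) =====
theorem detect_table_groups_py_spec : Claim_equal_detect_table_groups_py := by
  intro tables _
  show detect_table_groups_py tables = detect_table_groups_py_alt tables
  unfold detect_table_groups_py detect_table_groups_py_alt
  rw [detect_fold_eq]
  have hkeys : (tables.foldl (fun d t => d.modify (pvKeyB t) [] (fun l => l ++ [t]))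
      PySem.Dict.empty).keys = PySem.Set.ofList (tables.map pvKeyB) := by
    rw [PySem.Dict.keys_foldl_modify_key tables pvKeyB [] (fun _ t l => l ++ [t])]
    simp [PySem.Dict.keys_empty, PySem.Set.update_nil_left]
  have hnd : (tables.foldl (fun d t => d.modify (pvKeyB t) [] (fun l => l ++ [t]))
      PySem.Dict.empty).keys.Nodup := by
    rw [hkeys]; exact PySem.Set.nodup_ofList _
  rw [PySem.Dict.items_eq_map_keys _ hnd [], hkeys]
  show _ = (PySem.List.dedup (tables.map pvKeyB)).map
      (fun k => (k, ((tables.zip (tables.map pvKeyB)).filter (fun p => p.2 == k)).map (fun p => p.1)))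
  rw [PySem.List.dedup_eq_ofList]
  apply List.map_congr_left
  intro k _
  have hfold : tables.foldl (fun d t => d.modify (pvKeyB t) [] (fun l => l ++ [t])) PySem.Dict.empty
      = (tables.map (fun t => (pvKeyB t, t))).foldl
          (fun d p => d.modify p.1 [] (fun l => l ++ [p.2])) PySem.Dict.empty := by
    rw [List.foldl_map]
  rw [hfold, PySem.Dict.getD_foldl_modify_append]
  have hz : tables.zip (tables.map pvKeyB) = tables.map (fun t => (t, pvKeyB t)) := by
    have := List.zip_map' (f := fun t : String => t) (g := pvKeyB) (l := tables)
    simpa using this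
  rw [hz]
  simp [List.filter_map, PySem.Dict.getD_empty, Function.comp_def]
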